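-- pv_equiv track=rewrite | github.com/wikimedia/operations-docker-images-toollabs-images | build.py | lineage_of
-- ===== SOURCE A (Python) =====
-- IMAGES = {
--     "bullseye-sssd": {
--         "jdk17-sssd/base": ["jdk17-sssd/web"],
--         "mono68-sssd/base": [],
--         "node12-sssd/base": ["node12-sssd/web"],
--         "node16-sssd/base": ["node16-sssd/web"],
--         "perl532-sssd/base": ["perl532-sssd/web"],
--         "php74-sssd/base": ["php74-sssd/web"],
--         "python39-sssd/base": ["python39-sssd/web"],
--         "ruby27-sssd/base": ["ruby27-sssd/web"],
--         "tcl86-sssd/base": ["tcl86-sssd/web"],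
--     },
--     "bullseye-standalone": [],
--     # buildpack stacks
--     "bullseye0/base": ["bullseye0/build", "bullseye0/run"],
--     "bookworm-sssd": {
--         # bookworm-sssd is also the standalone bookworm container,
--         # web one just has webservice-runner included with it
--         "bookworm-web-sssd": [],
--         "node18-sssd/base": ["node18-sssd/web"],
--         "perl536-sssd/base": ["perl536-sssd/web"],
--         "php82-sssd/base": ["php82-sssd/web"],
--         "python311-sssd/base": ["python311-sssd/web"],
--         "ruby31-sssd/base": ["ruby31-sssd/web"],
--     },
--     "trixie-sssd": {
--         # trixie-sssd is also the standalone trixie container,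
--         # web one just has webservice-runner included with it
--         "trixie-web-sssd": [],
--         "jdk21-sssd/base": ["jdk21-sssd/web"],
--         "mariadb-sssd/base": [],
--         "mono612-sssd/base": [],
--         "node20-sssd/base": ["node20-sssd/web"],
--         "perl540-sssd/base": ["perl540-sssd/web"],
--         "php84-sssd/base": ["php84-sssd/web"],
--         "python313-sssd/base": ["python313-sssd/web"],
--         "ruby33-sssd/base": ["ruby33-sssd/web"],
--     },
-- }
--
-- def lineage_of(name):
--     def children_of(node):
--         if type(node) is dict:
--             children = list(node.keys())
--             for k, v in node.items():
--                 children += children_of(v)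
--             return children
--         return node
--
--     def ancestors_of(node, cur_lineage):
--         if name in node:
--             cur_lineage.append(name)
--             if type(node) is dict:
--                 cur_lineage.extend(children_of(node[name]))
--             return cur_lineage
--
--         if type(node) is dict:
--             for k, v in node.items():
--                 ret = ancestors_of(v, cur_lineage + [k])
--                 if ret:
--                     return ret
--         return None
--
--     return ancestors_of(IMAGES, [])
-- ===== SOURCE B (Python) =====
-- IMAGES = {
--     "bullseye-sssd": {
--         "jdk17-sssd/base": ["jdk17-sssd/web"],
--         "mono68-sssd/base": [],
--         "node12-sssd/base": ["node12-sssd/web"],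
--         "node16-sssd/base": ["node16-sssd/web"],
--         "perl532-sssd/base": ["perl532-sssd/web"],
--         "php74-sssd/base": ["php74-sssd/web"],
--         "python39-sssd/base": ["python39-sssd/web"],
--         "ruby27-sssd/base": ["ruby27-sssd/web"],
--         "tcl86-sssd/base": ["tcl86-sssd/web"],
--     },
--     "bullseye-standalone": [],
--     "bullseye0/base": ["bullseye0/build", "bullseye0/run"],
--     "bookworm-sssd": {
--         "bookworm-web-sssd": [],
--         "node18-sssd/base": ["node18-sssd/web"],
--         "perl536-sssd/base": ["perl536-sssd/web"],
--         "php82-sssd/base": ["php82-sssd/web"],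
--         "python311-sssd/base": ["python311-sssd/web"],
--         "ruby31-sssd/base": ["ruby31-sssd/web"],
--     },
--     "trixie-sssd": {
--         "trixie-web-sssd": [],
--         "jdk21-sssd/base": ["jdk21-sssd/web"],
--         "mariadb-sssd/base": [],
--         "mono612-sssd/base": [],
--         "node20-sssd/base": ["node20-sssd/web"],
--         "perl540-sssd/base": ["perl540-sssd/web"],
--         "php84-sssd/base": ["php84-sssd/web"],
--         "python313-sssd/base": ["python313-sssd/web"],
--         "ruby33-sssd/base": ["ruby33-sssd/web"],
--     },
-- }
--
--
-- def _flatten(node):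
--     # pre-order: a dict emits all its keys, then its values' contents in order
--     out = []
--     work = [node]
--     while work:
--         n = work.pop()
--         if type(n) is dict:
--             out.extend(n.keys())
--             work.extend(reversed(list(n.values())))
--         else:
--             out.extend(n)
--     return out
--
--
-- def lineage_of(name):
--     # iterative DFS with an explicit work stack of (node, path) frames
--     stack = [(IMAGES, [])]
--     while stack:
--         node, path = stack.pop()
--         if name in node:
--             res = path + [name]
--             if type(node) is dict:
--                 res.extend(_flatten(node[name]))
--             return res
--         if type(node) is dict:
--             for k, v in reversed(list(node.items())):
--                 stack.append((v, path + [k]))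
--     return None
-- ===== Notes on version B (the rewrite author's own statement) =====
-- stated objective: alternative
-- what changed: Replaces A's two nested recursive helpers (children_of / ancestors_of) by an iterative DFS over an explicit work stack of (node, path) frames, with the descendant list built by a stack-based pre-order walk instead of recursion.
import Mathlib
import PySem

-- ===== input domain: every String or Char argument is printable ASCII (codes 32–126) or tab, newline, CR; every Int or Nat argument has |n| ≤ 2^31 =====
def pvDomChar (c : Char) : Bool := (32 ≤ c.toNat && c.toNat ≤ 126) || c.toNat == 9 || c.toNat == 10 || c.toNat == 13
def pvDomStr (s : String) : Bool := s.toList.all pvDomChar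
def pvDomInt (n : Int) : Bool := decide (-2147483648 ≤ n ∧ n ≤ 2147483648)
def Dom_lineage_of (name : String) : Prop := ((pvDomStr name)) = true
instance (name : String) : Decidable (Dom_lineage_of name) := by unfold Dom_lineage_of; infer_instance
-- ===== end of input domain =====

-- B replaces A's two nested recursive helpers by an iterative DFS over an explicit work
-- stack plus a stack-based pre-order flattening of descendants (objective: alternative).

-- The fixed IMAGES tree has exactly two shapes of values: an inner dict mapping a key to a
-- list of leaf names, or a plain list of leaf names.  Both ports share this data type and
-- the literal constant IMAGES (data only, no logic).
-- Python dict → association list in insertion order; keys in the literal are distinct, so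
-- first-match lookup (List.find?) is exactly Python's dict lookup here.
def Entry : Type := (List (String × List String)) ⊕ (List String)

def IMAGES : List (String × Entry) :=
  [ ("bullseye-sssd", Sum.inl
      [ ("jdk17-sssd/base", ["jdk17-sssd/web"])
      , ("mono68-sssd/base", [])
      , ("node12-sssd/base", ["node12-sssd/web"])
      , ("node16-sssd/base", ["node16-sssd/web"])
      , ("perl532-sssd/base", ["perl532-sssd/web"])
      , ("php74-sssd/base", ["php74-sssd/web"])
      , ("python39-sssd/base", ["python39-sssd/web"])
      , ("ruby27-sssd/base", ["ruby27-sssd/web"])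
      , ("tcl86-sssd/base", ["tcl86-sssd/web"]) ])
  , ("bullseye-standalone", Sum.inr [])
  , ("bullseye0/base", Sum.inr ["bullseye0/build", "bullseye0/run"])
  , ("bookworm-sssd", Sum.inl
      [ ("bookworm-web-sssd", [])
      , ("node18-sssd/base", ["node18-sssd/web"])
      , ("perl536-sssd/base", ["perl536-sssd/web"])
      , ("php82-sssd/base", ["php82-sssd/web"])
      , ("python311-sssd/base", ["python311-sssd/web"])
      , ("ruby31-sssd/base", ["ruby31-sssd/web"]) ])
  , ("trixie-sssd", Sum.inl
      [ ("trixie-web-sssd", [])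
      , ("jdk21-sssd/base", ["jdk21-sssd/web"])
      , ("mariadb-sssd/base", [])
      , ("mono612-sssd/base", [])
      , ("node20-sssd/base", ["node20-sssd/web"])
      , ("perl540-sssd/base", ["perl540-sssd/web"])
      , ("php84-sssd/base", ["php84-sssd/web"])
      , ("python313-sssd/base", ["python313-sssd/web"])
      , ("ruby33-sssd/base", ["ruby33-sssd/web"]) ]) ]

-- dict lookup d[name] on the (distinct-key) literal dicts: first match
def lookupA {ν : Type} (d : List (String × ν)) (name : String) : Option ν :=
  (d.find? (fun p => p.1 == name)).map Prod.snd

-- ===== PORT A =====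
-- children_of(node): dict → keys, then for each value children += children_of(v)
-- (every value here is a list, for which children_of returns the list itself)
def childrenOf : Entry → List String
  | .inl d => d.foldl (fun acc p => acc ++ p.2) (d.map Prod.fst)
  | .inr l => l

-- ancestors_of(node, cur) with node a plain list: 'name in node' is element membership
def ancestorsList (name : String) (l : List String) (cur : List String) :
    Option (List String) :=
  if name ∈ l then some (cur ++ [name]) else none

-- the 'for k, v in node.items()' loop of ancestors_of for an inner dict
-- ('if ret:' = Python truthiness: an empty list is falsy)
def dictLoop (name : String) : List (String × List String) → List String →
    Option (List String)
  | [], _ => none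
  | (k, v) :: rest, cur =>
    match ancestorsList name v (cur ++ [k]) with
    | some r => if r = [] then dictLoop name rest cur else some r
    | none => dictLoop name rest cur

-- ancestors_of(node, cur) with node an inner dict
def ancestorsDict (name : String) (d : List (String × List String))
    (cur : List String) : Option (List String) :=
  if name ∈ d.map Prod.fst then
    some (cur ++ [name] ++ childrenOf (.inr ((lookupA d name).getD [])))
  else dictLoop name d cur

-- ancestors_of dispatch on the dynamic type of the value (dict vs list)
def ancestorsEntry (name : String) : Entry → List String → Option (List String)
  | .inl d, cur => ancestorsDict name d cur
  | .inr l, cur => ancestorsList name l cur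

-- the 'for k, v in node.items()' loop of ancestors_of at the outer dict
def outerLoop (name : String) : List (String × Entry) → List String →
    Option (List String)
  | [], _ => none
  | (k, v) :: rest, cur =>
    match ancestorsEntry name v (cur ++ [k]) with
    | some r => if r = [] then outerLoop name rest cur else some r
    | none => outerLoop name rest cur

-- ancestors_of(IMAGES, []) — the top node is a dict
def ancestorsOuter (name : String) (o : List (String × Entry)) (cur : List String) :
    Option (List String) :=
  if name ∈ o.map Prod.fst then
    some (cur ++ [name] ++ childrenOf ((lookupA o name).getD (.inr [])))
  else outerLoop name o cur

def lineage_of (name : String) : Option (List String) :=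
  ancestorsOuter name IMAGES []

-- ===== PORT B =====
-- B: iterative DFS.  Work-stack frames; pushing a dict's children reversed (Python
-- reversed(...) + list.pop()) = prepending them in order to the head of the list.
inductive BNode where
  | top : List (String × Entry) → BNode
  | ent : Entry → BNode

def costE : Entry → Nat
  | .inl d => 1 + d.length
  | .inr _ => 1

-- 'work.extend(reversed(list(n.values())))' with pops from the end = the values in order
def pushVals (d : List (String × List String)) : List Entry :=
  d.map (fun p => (Sum.inr p.2 : Entry))

-- 'out.extend(n.keys())'
def keysOf (d : List (String × List String)) : List String :=
  d.map Prod.fst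

def workCost (work : List Entry) : Nat := (work.map costE).sum

theorem workCost_append (a b : List Entry) :
    workCost (a ++ b) = workCost a + workCost b := by
  simp [workCost]

theorem workCost_cons (e : Entry) (w : List Entry) :
    workCost (e :: w) = costE e + workCost w := by
  simp [workCost]

theorem workCost_pushVals (d : List (String × List String)) :
    workCost (pushVals d) = d.length := by
  simp [workCost, pushVals, List.map_map, Function.comp_def, costE]

-- _flatten: stack-based pre-order walk emitting a dict's keys before its values' contents
def flattenB : List Entry → List String → List String
  | [], out => out
  | (.inl d) :: rest, out => flattenB (pushVals d ++ rest) (out ++ keysOf d)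
  | (.inr l) :: rest, out => flattenB rest (out ++ l)
termination_by work _ => workCost work
decreasing_by
  · simp only [workCost_append, workCost_cons, workCost_pushVals, costE]; omega
  · simp only [workCost_cons, costE]; omega

def costB : BNode → Nat
  | .top o => 1 + (o.map (fun p => costE p.2)).sum
  | .ent e => costE e

-- 'stack.append' of a dict's (value, path + [key]) children, reversed-then-popped = in order
def pushTop (path : List String) (o : List (String × Entry)) :
    List (BNode × List String) :=
  o.map (fun p => (BNode.ent p.2, path ++ [p.1]))

def pushMid (path : List String) (d : List (String × List String)) :
    List (BNode × List String) :=
  d.map (fun p => (BNode.ent (Sum.inr p.2), path ++ [p.1]))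

def stackCost (st : List (BNode × List String)) : Nat :=
  (st.map (fun f => costB f.1)).sum

theorem stackCost_append (a b : List (BNode × List String)) :
    stackCost (a ++ b) = stackCost a + stackCost b := by
  simp [stackCost]

theorem stackCost_cons (f : BNode × List String) (st : List (BNode × List String)) :
    stackCost (f :: st) = costB f.1 + stackCost st := by
  simp [stackCost]

theorem stackCost_pushTop (path : List String) (o : List (String × Entry)) :
    stackCost (pushTop path o) = (o.map (fun p => costE p.2)).sum := by
  simp [stackCost, pushTop, List.map_map, Function.comp_def, costB]

theorem stackCost_pushMid (path : List String) (d : List (String × List String)) :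
    stackCost (pushMid path d) = d.length := by
  simp [stackCost, pushMid, List.map_map, Function.comp_def, costB, costE]

-- the while-loop over the work stack
def bloop (name : String) : List (BNode × List String) → Option (List String)
  | [] => none
  | (.top o, path) :: rest =>
    if name ∈ o.map Prod.fst then
      some (path ++ [name] ++ flattenB [(lookupA o name).getD (.inr [])] [])
    else bloop name (pushTop path o ++ rest)
  | (.ent (.inl d), path) :: rest =>
    if name ∈ d.map Prod.fst then
      some (path ++ [name] ++ flattenB [Sum.inr ((lookupA d name).getD [])] [])
    else bloop name (pushMid path d ++ rest)
  | (.ent (.inr l), path) :: rest =>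
    if name ∈ l then some (path ++ [name]) else bloop name rest
termination_by st => stackCost st
decreasing_by
  · simp only [stackCost_append, stackCost_cons, stackCost_pushTop, costB]; omega
  · simp only [stackCost_append, stackCost_cons, stackCost_pushMid, costB, costE]; omega
  · simp only [stackCost_cons, costB, costE]; omega

def lineage_of_alt (name : String) : Option (List String) :=
  bloop name [(BNode.top IMAGES, [])]

-- ===== PRECONDITION & SPEC =====
def Spec_lineage_of (name : String) (out : Option (List String)) : Prop := out = lineage_of_alt name
instance (name : String) (out : Option (List String)) : Decidable (Spec_lineage_of name out) := by unfold Spec_lineage_of; infer_instance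

-- ===== CLAIM (what is proved, stated in full; the proofs are below) =====
def Claim_equal_lineage_of : Prop := ∀ (name : String), Dom_lineage_of name → Spec_lineage_of name (lineage_of name)

-- ===== LEMMAS AND PROOFS =====

theorem flattenB_eq (work : List Entry) (out : List String) :
    flattenB work out = out ++ (work.map childrenOf).flatten := by
  fun_induction flattenB work out with
  | case1 out => simp
  | case2 d rest out ih =>
    rw [ih]
    simp [pushVals, keysOf, childrenOf, List.map_map, List.flatten_append,
      Function.comp_def]
  | case3 l rest out ih => simp [ih, childrenOf]

theorem dictLoop_eq (name : String) (d : List (String × List String))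
    (cur : List String) :
    dictLoop name d cur =
      d.findSome? (fun p => ancestorsList name p.2 (cur ++ [p.1])) := by
  induction d with
  | nil => simp [dictLoop]
  | cons hd tl ih =>
    obtain ⟨k, v⟩ := hd
    simp only [dictLoop, List.findSome?_cons]
    by_cases h : name ∈ v
    · simp [ancestorsList, h]
    · simp [ancestorsList, h, ih]

theorem outerLoop_eq (name : String) (o : List (String × Entry)) (cur : List String) :
    outerLoop name o cur =
      o.findSome? (fun p => ancestorsEntry name p.2 (cur ++ [p.1])) := by
  induction o with
  | nil => simp [outerLoop]
  | cons hd tl ih =>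
    obtain ⟨k, v⟩ := hd
    simp only [outerLoop, List.findSome?_cons]
    cases hv : ancestorsEntry name v (cur ++ [k]) with
    | none => simp [ih]
    | some r =>
      have hr : r ≠ [] := by
        cases v with
        | inl d =>
          simp only [ancestorsEntry, ancestorsDict] at hv
          split at hv
          · simp at hv; simp [← hv]
          · rw [dictLoop_eq] at hv
            obtain ⟨p, -, hp⟩ := List.exists_of_findSome?_eq_some hv
            simp only [ancestorsList] at hp
            split at hp
            · simp at hp; simp [← hp]
            · simp at hp
        | inr l =>
          simp only [ancestorsEntry, ancestorsList] at hv
          split at hv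
          · simp at hv; simp [← hv]
          · simp at hv
      simp [hr]

def specA (name : String) : BNode × List String → Option (List String)
  | (.top o, p) => ancestorsOuter name o p
  | (.ent e, p) => ancestorsEntry name e p

theorem bloop_eq (name : String) (st : List (BNode × List String)) :
    bloop name st = st.findSome? (specA name) := by
  fun_induction bloop name st with
  | case1 => simp
  | case2 o path rest hmem =>
    simp only [List.findSome?_cons, specA, ancestorsOuter, if_pos hmem]
    simp [flattenB_eq]
  | case3 o path rest hmem ih =>
    rw [ih, List.findSome?_append, List.findSome?_cons]
    simp only [pushTop, List.findSome?_map, specA, ancestorsOuter, if_neg hmem,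
      outerLoop_eq]
    cases h : List.findSome? (fun p => ancestorsEntry name p.2 (path ++ [p.1])) o <;>
      simp [Function.comp_def, specA, h]
  | case4 d path rest hmem =>
    simp only [List.findSome?_cons, specA, ancestorsEntry, ancestorsDict, if_pos hmem]
    simp [flattenB_eq, childrenOf]
  | case5 d path rest hmem ih =>
    rw [ih, List.findSome?_append, List.findSome?_cons]
    simp only [pushMid, List.findSome?_map, specA, ancestorsEntry, ancestorsDict,
      if_neg hmem, dictLoop_eq]
    cases h : List.findSome? (fun p => ancestorsList name p.2 (path ++ [p.1])) d <;>
      simp [Function.comp_def, specA, ancestorsEntry, h]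
  | case6 l path rest hmem =>
    simp [specA, ancestorsEntry, ancestorsList, if_pos hmem]
  | case7 l path rest hmem ih =>
    simp [specA, ancestorsEntry, ancestorsList, if_neg hmem, ih]

-- ===== VERDICT (by name: the statement is the Claim_ definition above) =====
theorem lineage_of_spec : Claim_equal_lineage_of := by
  intro name _
  unfold Spec_lineage_of lineage_of lineage_of_alt
  rw [bloop_eq]
  cases h : ancestorsOuter name IMAGES [] <;> simp [specA, h]
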